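-- pv_equiv track=rewrite | github.com/cjmcgreal/ygg_src | dev/finance_module/finance_logic.py | is_valid_category_path
-- ===== SOURCE A (Python) =====
-- def is_valid_category_path(category_path: str) -> bool:
--     """
--     Validate that a category path is properly formatted.
--
--     Rules:
--     - Must not be empty
--     - Must not start or end with "/"
--     - Must not contain consecutive "//"
--     - Must not contain special characters (only alphanumeric, underscore, and "/")
--
--     Args:
--         category_path (str): Category path to validate
--
--     Returns:
--         bool: True if valid, False otherwise
--
--     Example:
--         >>> is_valid_category_path("transportation/car")
--         True
--         >>> is_valid_category_path("/invalid/path")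
--         False
--     """
--     if not category_path:
--         return False
--
--     # Must not start or end with "/"
--     if category_path.startswith('/') or category_path.endswith('/'):
--         return False
--
--     # Must not contain consecutive "//"
--     if '//' in category_path:
--         return False
--
--     # Check each component
--     parts = category_path.split('/')
--     for part in parts:
--         if not part:  # Empty component
--             return False
--
--         # Allow alphanumeric, underscore, hyphen, and space
--         if not all(c.isalnum() or c in ('_', '-', ' ') for c in part):
--             return False
--
--     return True
-- ===== SOURCE B (Python) =====
-- def is_valid_category_path(category_path: str) -> bool:
--     # Single left-to-right scan tracking the previous character; a component
--     # boundary is invalid exactly when two slashes are adjacent or a slash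
--     # sits at either end (modelled by seeding prev with '/').
--     prev = '/'
--     for c in category_path:
--         if c == '/':
--             if prev == '/':
--                 return False
--         elif not (c.isalnum() or c in '_- '):
--             return False
--         prev = c
--     return prev != '/'
-- ===== Notes on version B (the rewrite author's own statement) =====
-- stated objective: alternative
-- what changed: Replaced the four separate guards (empty check, startswith/endswith slash, double-slash substring scan, split on slash plus per-part character checks) by one single left-to-right scan that tracks the previous character, so the string is traversed once with no intermediate parts list.
import Mathlib
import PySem

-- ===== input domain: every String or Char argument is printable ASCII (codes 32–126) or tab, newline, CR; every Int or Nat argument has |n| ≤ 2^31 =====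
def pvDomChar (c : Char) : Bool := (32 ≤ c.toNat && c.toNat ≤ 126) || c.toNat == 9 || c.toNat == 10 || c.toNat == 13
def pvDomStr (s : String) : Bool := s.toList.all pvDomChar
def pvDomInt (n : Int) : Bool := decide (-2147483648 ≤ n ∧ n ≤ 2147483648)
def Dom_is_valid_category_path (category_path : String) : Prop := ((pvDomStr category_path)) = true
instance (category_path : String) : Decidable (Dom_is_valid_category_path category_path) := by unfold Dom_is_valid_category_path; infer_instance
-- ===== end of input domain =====

-- B replaces A's four separate guards + split('/') pass by one single scan tracking the previous character.


-- ===== PORT A =====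
def is_valid_category_path (category_path : String) : Bool :=
  -- if not category_path: return False
  if PySem.Str.len category_path == 0 then false
  -- if category_path.startswith('/') or category_path.endswith('/'): return False
  else if PySem.Str.startswith category_path "/" || PySem.Str.endswith category_path "/" then false
  -- if '//' in category_path: return False
  else if PySem.Str.isIn "//" category_path then false
  else
    -- parts = category_path.split('/'); the per-part loop with early return False = .all
    match PySem.Str.split? category_path "/" with
    | none => false  -- unreachable: separator "/" is nonempty
    | some parts =>
        parts.all (fun part =>
          !(PySem.Str.len part == 0) &&
          part.toList.all (fun c => PySem.Chars.isalnum c || c == '_' || c == '-' || c == ' '))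

-- ===== PORT B =====
-- loop body of Source B: state = some prev while scanning, none once a `return False` fired
def pvStepB (st : Option Char) (c : Char) : Option Char :=
  match st with
  | none => none
  | some prev =>
      if c == '/' then (if prev == '/' then none else some c)
      else if PySem.Chars.isalnum c || c == '_' || c == '-' || c == ' ' then some c
      else none

def is_valid_category_path_alt (category_path : String) : Bool :=
  match category_path.toList.foldl pvStepB (some '/') with
  | none => false
  | some prev => !(prev == '/')

-- ===== PRECONDITION & SPEC =====
def Spec_is_valid_category_path (category_path : String) (out : Bool) : Prop := out = is_valid_category_path_alt category_path
instance (category_path : String) (out : Bool) : Decidable (Spec_is_valid_category_path category_path out) := by unfold Spec_is_valid_category_path; infer_instance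

-- ===== CLAIM (what is proved, stated in full; the proofs are below) =====
def Claim_equal_is_valid_category_path : Prop := ∀ (category_path : String), Dom_is_valid_category_path category_path → Spec_is_valid_category_path category_path (is_valid_category_path category_path)

-- ===== LEMMAS AND PROOFS =====

-- allowed non-slash character
def pvOk (c : Char) : Bool := PySem.Chars.isalnum c || c == '_' || c == '-' || c == ' '

-- reference recursion for B's scan: the flag records whether the previous char was '/'
def pvV : Bool → List Char → Bool
  | ps, [] => !ps
  | ps, c :: t => if c == '/' then (!ps && pvV true t) else (pvOk c && pvV false t)

-- reference recursion for split on '/'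
def pvSplit : List Char → List (List Char)
  | [] => [[]]
  | c :: t => if c == '/' then [] :: pvSplit t else (pvSplit t).modifyHead (c :: ·)

def pvGood (p : List Char) : Bool := !(p.length == 0) && p.all pvOk

theorem pvFoldl_none (l : List Char) : l.foldl pvStepB none = none := by
  induction l with
  | nil => rfl
  | cons c t ih => simpa [pvStepB] using ih

theorem pvFoldl_eq_V (l : List Char) (p : Char) :
    (match l.foldl pvStepB (some p) with
     | none => false
     | some q => !(q == '/')) = pvV (p == '/') l := by
  induction l generalizing p with
  | nil => rfl
  | cons c t ih =>
    rw [List.foldl_cons]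
    by_cases hc : c = '/'
    · subst hc
      by_cases hp : p = '/'
      · subst hp
        simp [pvStepB, pvV, pvFoldl_none]
      · have hstep : pvStepB (some p) '/' = some '/' := by simp [pvStepB, hp]
        rw [hstep, ih]
        simp [pvV, hp]
    · by_cases hok : pvOk c = true
      · have hok' : (PySem.Chars.isalnum c || c == '_' || c == '-' || c == ' ') = true := by
          unfold pvOk at hok; exact hok
        have hstep : pvStepB (some p) c = some c := by simp [pvStepB, hc, hok']
        rw [hstep, ih, show (c == '/') = false from by simp [hc]]
        simp [pvV, hc, hok]
      · have hok' : (PySem.Chars.isalnum c || c == '_' || c == '-' || c == ' ') = false := by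
          have : pvOk c = false := by simpa using hok
          unfold pvOk at this; exact this
        have hstep : pvStepB (some p) c = none := by simp [pvStepB, hc, hok']
        rw [hstep, pvFoldl_none]
        have hokf : pvOk c = false := by simpa using hok
        simp [pvV, hc, hokf]

theorem pvSplit_len_pos (l : List Char) : 0 < (pvSplit l).length := by
  induction l with
  | nil => simp [pvSplit]
  | cons c t ih =>
    by_cases hc : c = '/' <;> simp [pvSplit, hc, ih]

theorem pvSplit_ne_nil (l : List Char) : pvSplit l ≠ [] := by
  intro h
  have := pvSplit_len_pos l
  rw [h] at this
  simp at this

theorem pvV_split (l : List Char) :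
    pvV true l = (pvSplit l).all pvGood ∧
    pvV false l = ((pvSplit l).headI.all pvOk && ((pvSplit l).tail).all pvGood) := by
  induction l with
  | nil => simp [pvV, pvSplit, pvGood]
  | cons c t ih =>
    by_cases hc : c = '/'
    · subst hc
      constructor
      · simp [pvV, pvSplit, pvGood]
      · simp [pvV, pvSplit, ih.1]
    · obtain ⟨h1, h2⟩ := ih
      cases hs : pvSplit t with
      | nil => exact absurd hs (pvSplit_ne_nil t)
      | cons h tl =>
        constructor <;>
          simp [pvV, pvSplit, hc, hs, pvGood, h2, Bool.and_assoc]

theorem pvGood_false_of_mem_nil {ps : List (List Char)} (h : ([] : List Char) ∈ ps) :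
    ps.all pvGood = false := by
  rw [List.all_eq_false]
  exact ⟨[], h, by simp [pvGood]⟩

theorem pvSplit_len2 (l : List Char) (h : '/' ∈ l) : 2 ≤ (pvSplit l).length := by
  induction l with
  | nil => simp at h
  | cons c t ih =>
    by_cases hc : c = '/'
    · have := pvSplit_len_pos t
      simp [pvSplit, hc]
      omega
    · have ht : '/' ∈ t := by
        rcases List.mem_cons.mp h with h1 | h1
        · exact absurd h1.symm hc
        · exact h1
      have := ih ht
      simp [pvSplit, hc]
      omega

theorem pvSplit_getLast_of_last_slash (l : List Char) (h : l.getLast? = some '/') :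
    (pvSplit l).getLast? = some [] := by
  induction l with
  | nil => simp at h
  | cons c t ih =>
    cases t with
    | nil =>
      simp at h
      simp [pvSplit, h]
    | cons d t' =>
      have ht : (d :: t').getLast? = some '/' := by
        rwa [List.getLast?_cons_cons] at h
      have ih' := ih ht
      by_cases hc : c = '/'
      · rw [pvSplit, if_pos (by simp [hc])]
        cases hs : pvSplit (d :: t') with
        | nil => exact absurd hs (pvSplit_ne_nil _)
        | cons p ps =>
          rw [hs] at ih'
          rw [List.getLast?_cons_cons]
          exact ih'
      · have hmem : '/' ∈ d :: t' := List.mem_of_getLast? ht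
        have hlen := pvSplit_len2 _ hmem
        rw [pvSplit, if_neg (by simp [hc])]
        cases hs : pvSplit (d :: t') with
        | nil => exact absurd hs (pvSplit_ne_nil _)
        | cons p ps =>
          cases ps with
          | nil => rw [hs] at hlen; simp at hlen
          | cons q qs =>
            rw [hs] at ih'
            simpa [List.modifyHead, List.getLast?_cons_cons] using ih'

theorem pvSplit_tail_mem_of_dslash (l : List Char) (h : ['/', '/'] <:+: l) :
    ([] : List Char) ∈ (pvSplit l).tail := by
  induction l with
  | nil => simp at h
  | cons c t ih =>
    rw [List.infix_cons_iff] at h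
    rcases h with h | h
    · obtain ⟨r, hr⟩ := h
      simp only [List.cons_append, List.nil_append] at hr
      injection hr with h1 h2
      subst h1
      subst h2
      simp [pvSplit]
    · have ih' := ih h
      by_cases hc : c = '/'
      · rw [pvSplit, if_pos (by simp [hc])]
        exact List.mem_of_mem_tail ih'
      · rw [pvSplit, if_neg (by simp [hc])]
        cases hs : pvSplit t with
        | nil => exact absurd hs (pvSplit_ne_nil _)
        | cons p ps => rw [hs] at ih'; simpa using ih'

-- the fuel-based PySem split agrees with pvSplit
theorem pvGo_eq (l : List Char) (fuel : Nat) (cur : List Char) (acc : List (List Char))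
    (hf : l.length ≤ fuel) :
    PySem.Chars.splitOn.go ['/'] fuel l cur acc
      = acc.reverse ++ (pvSplit l).modifyHead (cur.reverse ++ ·) := by
  induction l generalizing fuel cur acc with
  | nil =>
    cases fuel with
    | zero => simp [PySem.Chars.splitOn.go, pvSplit]
    | succ f => simp [PySem.Chars.splitOn.go, pvSplit]
  | cons c t ih =>
    cases fuel with
    | zero => simp at hf
    | succ f =>
      have hf' : t.length ≤ f := by simpa using hf
      by_cases hc : c = '/'
      · subst hc
        rw [PySem.Chars.splitOn.go]
        rw [if_pos (by simp [List.isPrefixOf])]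
        rw [show List.drop ['/'].length ('/' :: t) = t from rfl]
        rw [ih f [] (cur.reverse :: acc) hf']
        cases hs : pvSplit t with
        | nil => exact absurd hs (pvSplit_ne_nil _)
        | cons p ps => simp [pvSplit, hs]
      · rw [PySem.Chars.splitOn.go]
        rw [if_neg (by simp [List.isPrefixOf]; exact fun h => hc h.symm)]
        rw [ih f (c :: cur) acc hf']
        cases hs : pvSplit t with
        | nil => exact absurd hs (pvSplit_ne_nil _)
        | cons p ps => simp [pvSplit, hc, hs]

theorem pvSplitOn_eq (l : List Char) : PySem.Chars.splitOn l ['/'] = pvSplit l := by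
  have := pvGo_eq l (l.length + 1) [] [] (by omega)
  rw [PySem.Chars.splitOn] at *
  simp at this
  rw [this]
  cases hs : pvSplit l with
  | nil => exact absurd hs (pvSplit_ne_nil _)
  | cons p ps => simp

-- if the string ends with '/', starts with '/', or contains '//' (or is empty), some split part is empty
theorem pvMem_nil_of_bad (l : List Char)
    (h : l = [] ∨ l.head? = some '/' ∨ l.getLast? = some '/' ∨ ['/', '/'] <:+: l) :
    ([] : List Char) ∈ pvSplit l := by
  rcases h with h | h | h | h
  · subst h; simp [pvSplit]
  · cases l with
    | nil => simp at h
    | cons c t =>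
      have : c = '/' := by simpa using h
      simp [pvSplit, this]
  · have := pvSplit_getLast_of_last_slash l h
    exact List.mem_of_getLast? this
  · exact List.mem_of_mem_tail (pvSplit_tail_mem_of_dslash l h)

theorem pvSingleton_prefix_iff (c : Char) (l : List Char) : [c] <+: l ↔ l.head? = some c := by
  cases l <;> simp [List.cons_prefix_iff]

theorem pvSingleton_suffix_iff (c : Char) (l : List Char) : [c] <:+ l ↔ l.getLast? = some c := by
  rw [List.getLast?_eq_some_iff]
  constructor
  · rintro ⟨ys, hy⟩; exact ⟨ys, hy.symm⟩
  · rintro ⟨ys, hy⟩; exact ⟨ys, hy.symm⟩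

theorem pvAlt_eq (s : String) : is_valid_category_path_alt s = (pvSplit s.toList).all pvGood := by
  unfold is_valid_category_path_alt
  rw [pvFoldl_eq_V]
  simpa using (pvV_split s.toList).1

theorem pvA_eq (s : String) : is_valid_category_path s = (pvSplit s.toList).all pvGood := by
  unfold is_valid_category_path
  by_cases h0 : s.toList = []
  · rw [if_pos (by rw [PySem.Str.len_eq, h0]; decide)]
    exact (pvGood_false_of_mem_nil (pvMem_nil_of_bad _ (Or.inl h0))).symm
  rw [if_neg (by
    rw [PySem.Str.len_eq]
    simp only [beq_iff_eq, Nat.cast_eq_zero, List.length_eq_zero_iff]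
    exact h0)]
  by_cases hh : s.toList.head? = some '/'
  · rw [if_pos (by simp [PySem.Str.startswith_eq, PySem.Chars.startswith_iff,
      show ("/" : String).toList = ['/'] from rfl, pvSingleton_prefix_iff, hh])]
    exact (pvGood_false_of_mem_nil (pvMem_nil_of_bad _ (Or.inr (Or.inl hh)))).symm
  by_cases hl : s.toList.getLast? = some '/'
  · rw [if_pos (by simp [PySem.Str.endswith_eq, PySem.Chars.endswith_iff,
      show ("/" : String).toList = ['/'] from rfl, pvSingleton_suffix_iff, hl])]
    exact (pvGood_false_of_mem_nil (pvMem_nil_of_bad _ (Or.inr (Or.inr (Or.inl hl))))).symm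
  rw [if_neg (by simp [PySem.Str.startswith_eq, PySem.Chars.startswith_iff,
      PySem.Str.endswith_eq, PySem.Chars.endswith_iff,
      show ("/" : String).toList = ['/'] from rfl,
      pvSingleton_prefix_iff, pvSingleton_suffix_iff, hh, hl])]
  by_cases hdd : ['/', '/'] <:+: s.toList
  · rw [if_pos (by simp [PySem.Str.isIn_eq, PySem.Chars.isIn_iff_infix,
      show ("//" : String).toList = ['/', '/'] from rfl, hdd])]
    exact (pvGood_false_of_mem_nil (pvMem_nil_of_bad _ (Or.inr (Or.inr (Or.inr hdd))))).symm
  rw [if_neg (by simp [PySem.Str.isIn_eq, PySem.Chars.isIn_iff_infix,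
      show ("//" : String).toList = ['/', '/'] from rfl, hdd])]
  obtain ⟨parts, hps, hmap⟩ : ∃ parts, PySem.Str.split? s "/" = some parts ∧
      parts.map String.toList = pvSplit s.toList := by
    have hb := PySem.Str.split?_map s "/"
    rw [show ("/" : String).toList = ['/'] from rfl, PySem.Chars.split?,
      if_neg (by simp), pvSplitOn_eq] at hb
    cases hsp : PySem.Str.split? s "/" with
    | none => rw [hsp] at hb; simp at hb
    | some parts =>
      rw [hsp] at hb
      simp at hb
      exact ⟨parts, rfl, hb⟩
  rw [hps, ← hmap, List.all_map]
  have hcast : ∀ n : Nat, (((n : Int)) == 0) = (n == 0) := by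
    intro n
    by_cases h : n = 0 <;> simp [h]
  show (parts.all fun part =>
      !(PySem.Str.len part == 0) &&
      part.toList.all fun c =>
        PySem.Chars.isalnum c || c == '_' || c == '-' || c == ' ') =
    parts.all (pvGood ∘ String.toList)
  congr 1
  funext part
  simp [PySem.Str.len_eq, pvGood, Function.comp, hcast]
  rfl

-- ===== VERDICT (by name: the statement is the Claim_ definition above) =====
theorem is_valid_category_path_spec : Claim_equal_is_valid_category_path := by
  intro s _
  unfold Spec_is_valid_category_path
  rw [pvA_eq, pvAlt_eq]
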